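-- pv_equiv track=rewrite | github.com/Zeydel/Advent-Of-Code | AoC25/Day09/Day09.py | is_rectange_in_tiles
-- ===== SOURCE A (Python) =====
-- def is_rectange_in_tiles(c1, c2, outer_boundry):
--
--     # Get max and min values for x and y
--     c1x, c1y = c1
--     c2x, c2y = c2
--
--     min_x = min(c1x, c2x)
--     max_x = max(c1x, c2x)
--
--     min_y = min(c1y, c2y)
--     max_y = max(c1y, c2y)
--
--     # For every coordinate on the rectangle boundry, check if a point
--     # is on the outside bounds of the big shape. If so return False
--     for x in [min_x, max_x]:
--         for y in range(min_y, max_y+1):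
--             if (x, y) in outer_boundry:
--                 return False
--
--     for y in [min_y, max_y]:
--         for x in range(min_x, max_x+1):
--             if (x, y) in outer_boundry:
--                 return False
--
--     # Return True, if we couldn't find any points outside the shape
--     return True
-- ===== SOURCE B (Python) =====
-- def is_rectange_in_tiles(c1, c2, outer_boundry):
--     # B: instead of enumerating the rectangle's perimeter cells and testing set
--     # membership, scan the boundary points once and test each against a
--     # perimeter predicate.
--     c1x, c1y = c1
--     c2x, c2y = c2
--     min_x, max_x = min(c1x, c2x), max(c1x, c2x)
--     min_y, max_y = min(c1y, c2y), max(c1y, c2y)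
--     for px, py in outer_boundry:
--         if (px == min_x or px == max_x) and min_y <= py <= max_y:
--             return False
--         if (py == min_y or py == max_y) and min_x <= px <= max_x:
--             return False
--     return True
-- ===== Notes on version B (the rewrite author's own statement) =====
-- stated objective: faster
-- what changed: Instead of enumerating every cell on the rectangle's four edges and testing membership in outer_boundry, B makes a single pass over outer_boundry and tests each point with a constant-time perimeter predicate on the min/max bounds.
import Mathlib
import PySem

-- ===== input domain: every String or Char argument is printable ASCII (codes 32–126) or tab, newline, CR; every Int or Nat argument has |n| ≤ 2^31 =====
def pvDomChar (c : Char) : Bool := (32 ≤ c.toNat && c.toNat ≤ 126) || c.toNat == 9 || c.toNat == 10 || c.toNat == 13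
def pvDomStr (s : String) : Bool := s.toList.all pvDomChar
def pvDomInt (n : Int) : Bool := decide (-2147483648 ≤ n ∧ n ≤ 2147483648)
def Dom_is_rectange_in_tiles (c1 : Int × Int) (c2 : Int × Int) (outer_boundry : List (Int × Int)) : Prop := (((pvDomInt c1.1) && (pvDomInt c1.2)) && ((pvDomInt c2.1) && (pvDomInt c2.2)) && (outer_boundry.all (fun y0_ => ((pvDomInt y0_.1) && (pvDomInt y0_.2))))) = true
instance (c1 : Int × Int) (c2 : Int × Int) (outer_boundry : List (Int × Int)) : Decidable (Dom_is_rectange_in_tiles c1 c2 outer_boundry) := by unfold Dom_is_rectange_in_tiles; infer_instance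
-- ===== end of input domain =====

-- B scans outer_boundry once with a perimeter predicate instead of enumerating the rectangle's edge cells and testing membership (alternative decomposition).


-- ===== PORT A =====
-- A: for each x in [min_x, max_x], each y in range(min_y, max_y+1): membership test
-- (early return False ported as List.any); then the same for the horizontal edges.
def is_rectange_in_tiles (c1 : Int × Int) (c2 : Int × Int) (outer_boundry : List (Int × Int)) : Bool :=
  let c1x := c1.1; let c1y := c1.2
  let c2x := c2.1; let c2y := c2.2
  let min_x := min c1x c2x
  let max_x := max c1x c2x
  let min_y := min c1y c2y
  let max_y := max c1y c2y
  if [min_x, max_x].any (fun x =>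
      (PySem.List.pyRange min_y (max_y + 1) 1).any (fun y => (x, y) ∈ outer_boundry)) then
    false
  else if [min_y, max_y].any (fun y =>
      (PySem.List.pyRange min_x (max_x + 1) 1).any (fun x => (x, y) ∈ outer_boundry)) then
    false
  else
    true

-- ===== PORT B =====
-- B: one pass over outer_boundry; early return False ported as List.all of the negated predicate.
def is_rectange_in_tiles_alt (c1 : Int × Int) (c2 : Int × Int) (outer_boundry : List (Int × Int)) : Bool :=
  let c1x := c1.1; let c1y := c1.2
  let c2x := c2.1; let c2y := c2.2
  let min_x := min c1x c2x
  let max_x := max c1x c2x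
  let min_y := min c1y c2y
  let max_y := max c1y c2y
  outer_boundry.all (fun p =>
    !(((p.1 == min_x || p.1 == max_x) && (min_y ≤ p.2 && p.2 ≤ max_y)) ||
      ((p.2 == min_y || p.2 == max_y) && (min_x ≤ p.1 && p.1 ≤ max_x))))

-- ===== PRECONDITION & SPEC =====
def Spec_is_rectange_in_tiles (c1 : Int × Int) (c2 : Int × Int) (outer_boundry : List (Int × Int)) (out : Bool) : Prop := out = is_rectange_in_tiles_alt c1 c2 outer_boundry
instance (c1 : Int × Int) (c2 : Int × Int) (outer_boundry : List (Int × Int)) (out : Bool) : Decidable (Spec_is_rectange_in_tiles c1 c2 outer_boundry out) := by unfold Spec_is_rectange_in_tiles; infer_instance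

-- ===== CLAIM (what is proved, stated in full; the proofs are below) =====
def Claim_equal_is_rectange_in_tiles : Prop := ∀ (c1 : Int × Int) (c2 : Int × Int) (outer_boundry : List (Int × Int)), Dom_is_rectange_in_tiles c1 c2 outer_boundry → Spec_is_rectange_in_tiles c1 c2 outer_boundry (is_rectange_in_tiles c1 c2 outer_boundry)

-- ===== LEMMAS AND PROOFS =====

theorem pv_ite_or (a b : Bool) : (if a then false else if b then false else true) = !(a || b) := by
  cases a <;> cases b <;> rfl

-- ===== VERDICT (by name: the statement is the Claim_ definition above) =====
theorem is_rectange_in_tiles_spec : Claim_equal_is_rectange_in_tiles := by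
  intro c1 c2 ob _
  unfold Spec_is_rectange_in_tiles is_rectange_in_tiles is_rectange_in_tiles_alt
  simp only [pv_ite_or]
  simp only [List.any_cons, List.any_nil, Bool.or_false]
  rw [Bool.eq_iff_iff]
  simp only [List.any_eq_false, List.all_eq_true, PySem.List.mem_pyRange_one,
    Bool.not_eq_true', Bool.or_eq_false_iff, Bool.and_eq_false_iff, beq_eq_false_iff_ne,
    decide_eq_true_eq, decide_eq_false_iff_not, not_le, ne_eq]
  constructor
  · rintro ⟨⟨h1, h2⟩, h3, h4⟩ ⟨px, py⟩ hp
    refine ⟨?_, ?_⟩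
    · by_contra hc
      push Not at hc
      obtain ⟨hx, hy1, hy2⟩ := hc
      by_cases h : px = min c1.1 c2.1
      · exact h1 py ⟨hy1, by omega⟩ (h ▸ hp)
      · exact h2 py ⟨hy1, by omega⟩ ((hx h) ▸ hp)
    · by_contra hc
      push Not at hc
      obtain ⟨hy, hx1, hx2⟩ := hc
      by_cases h : py = min c1.2 c2.2
      · exact h3 px ⟨hx1, by omega⟩ (h ▸ hp)
      · exact h4 px ⟨hx1, by omega⟩ ((hy h) ▸ hp)
  · intro h
    refine ⟨⟨?_, ?_⟩, ?_, ?_⟩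
    · rintro y ⟨hy1, hy2⟩ hmem
      rcases (h _ hmem).1 with ⟨hne, _⟩ | hb | hb
      · exact hne rfl
      · omega
      · omega
    · rintro y ⟨hy1, hy2⟩ hmem
      rcases (h _ hmem).1 with ⟨_, hne⟩ | hb | hb
      · exact hne rfl
      · omega
      · omega
    · rintro x ⟨hx1, hx2⟩ hmem
      rcases (h _ hmem).2 with ⟨hne, _⟩ | hb | hb
      · exact hne rfl
      · omega
      · omega
    · rintro x ⟨hx1, hx2⟩ hmem
      rcases (h _ hmem).2 with ⟨_, hne⟩ | hb | hb
      · exact hne rfl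
      · omega
      · omega
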